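-- pv_equiv track=rewrite | github.com/AversionToDeepWater/WorkShowcase | Exams/Specialisation/Unique_Consonants.py | unique_consonants
-- ===== SOURCE A (Python) =====
-- from collections import Counter
--
-- def unique_consonants(string:str):
--     c_number = 0
--     lower_case = string.lower()
--     vowels = {'a', 'e', 'i', 'o', 'u'}
--     consonants = []
--
--     for i in lower_case:
--         if i not in vowels and i.isalpha():
--             consonants.append(i)
--
--     count = Counter(consonants)
--
--     for i in count:
--         if count[i] == 1:
--             c_number += 1
--     return c_number
-- ===== SOURCE B (Python) =====
-- def unique_consonants(string: str):
--     seen_once = set()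
--     seen_multiple = set()
--     vowels = {'a', 'e', 'i', 'o', 'u'}
--     for ch in string.lower():
--         if ch.isalpha() and ch not in vowels:
--             if ch in seen_multiple:
--                 continue
--             if ch in seen_once:
--                 seen_once.discard(ch)
--                 seen_multiple.add(ch)
--             else:
--                 seen_once.add(ch)
--     return len(seen_once)
-- ===== Notes on version B (the rewrite author's own statement) =====
-- stated objective: idiomatic
-- what changed: B replaces A's build-a-consonant-list-then-Counter-then-scan-the-keys pipeline with a single pass that maintains two membership sets (seen once / seen more than once) and returns the size of the first; no intermediate list or count table is built.
import Mathlib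
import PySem

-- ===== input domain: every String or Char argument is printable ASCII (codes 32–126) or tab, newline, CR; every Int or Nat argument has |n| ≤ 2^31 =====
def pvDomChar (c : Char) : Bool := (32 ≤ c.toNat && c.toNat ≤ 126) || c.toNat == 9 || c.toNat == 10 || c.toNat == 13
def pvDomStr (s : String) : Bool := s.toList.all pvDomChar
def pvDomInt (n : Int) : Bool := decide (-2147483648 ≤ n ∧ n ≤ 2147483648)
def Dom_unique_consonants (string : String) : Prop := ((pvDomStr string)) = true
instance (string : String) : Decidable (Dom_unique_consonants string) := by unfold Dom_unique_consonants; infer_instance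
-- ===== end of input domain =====

-- B replaces A's consonant-list + Counter + key-scan pipeline by one pass keeping two membership sets (seen once / seen multiple); same result, no counts built.

-- ===== PORT A =====
def unique_consonants (string : String) : Int :=
  let c_number : Int := 0
  let lower_case := PySem.Str.lower string
  let vowels : PySem.Set Char := PySem.Set.ofList ['a', 'e', 'i', 'o', 'u']
  let consonants : List Char :=
    lower_case.toList.foldl
      (fun acc i => if !vowels.contains i && PySem.Chars.isalpha i then acc ++ [i] else acc) []
  let count := PySem.Dict.counter consonants
  count.keys.foldl (fun acc i => if count.getD i 0 == 1 then acc + 1 else acc) c_number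

-- ===== PORT B =====
def pvStepB (st : PySem.Set Char × PySem.Set Char) (ch : Char) : PySem.Set Char × PySem.Set Char :=
  if st.2.contains ch then st
  else if st.1.contains ch then (st.1.discard ch, st.2.add ch)
  else (st.1.add ch, st.2)

def unique_consonants_alt (string : String) : Int :=
  let vowels : PySem.Set Char := PySem.Set.ofList ['a', 'e', 'i', 'o', 'u']
  let st :=
    (PySem.Str.lower string).toList.foldl
      (fun st ch =>
        if PySem.Chars.isalpha ch && !vowels.contains ch then pvStepB st ch else st)
      (PySem.Set.empty, PySem.Set.empty)
  PySem.Set.len st.1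

-- ===== PRECONDITION & SPEC =====
def Spec_unique_consonants (string : String) (out : Int) : Prop := out = unique_consonants_alt string
instance (string : String) (out : Int) : Decidable (Spec_unique_consonants string out) := by unfold Spec_unique_consonants; infer_instance

-- ===== CLAIM (what is proved, stated in full; the proofs are below) =====
def Claim_equal_unique_consonants : Prop := ∀ (string : String), Dom_unique_consonants string → Spec_unique_consonants string (unique_consonants string)

-- ===== LEMMAS AND PROOFS =====

-- invariant of B's loop state after processing the filtered history h
def pvInv (h : List Char) (st : PySem.Set Char × PySem.Set Char) : Prop :=
  st.1 = (PySem.List.dedup h).filter (fun c => h.count c == 1) ∧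
  ∀ x, x ∈ st.2 ↔ 2 ≤ h.count x

theorem pv_mem_dedup {h : List Char} {c : Char} : c ∈ PySem.List.dedup h ↔ c ∈ h := by
  simp [PySem.List.dedup_eq_ofList, PySem.Set.mem_ofList]

theorem pv_dedup_append {h : List Char} {c : Char} :
    PySem.List.dedup (h ++ [c]) =
      if c ∈ h then PySem.List.dedup h else PySem.List.dedup h ++ [c] := by
  simp only [PySem.List.dedup_eq_ofList, PySem.Set.ofList_append]
  show (PySem.Set.ofList h).add c = _
  by_cases hc : c ∈ h
  · simp [PySem.Set.add, List.contains_eq_mem, PySem.Set.mem_ofList, hc]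
  · simp [PySem.Set.add, List.contains_eq_mem, PySem.Set.mem_ofList, hc]

theorem pvStep_inv (h : List Char) (c : Char) (st : PySem.Set Char × PySem.Set Char)
    (hinv : pvInv h st) : pvInv (h ++ [c]) (pvStepB st c) := by
  obtain ⟨h1, h2⟩ := hinv
  unfold pvStepB
  by_cases hm : st.2.contains c = true
  · -- c already seen at least twice: state unchanged
    have hcnt : 2 ≤ h.count c := (h2 c).mp (by simpa [List.contains_eq_mem] using hm)
    have hcmem : c ∈ h := List.count_pos_iff.mp (by omega)
    rw [if_pos hm]
    constructor
    · rw [h1, pv_dedup_append, if_pos hcmem]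
      apply List.filter_congr
      intro x _
      by_cases hx : x = c
      · subst hx; simp [List.count_append]; omega
      · simp [List.count_append, Ne.symm hx]
    · intro x
      rw [h2 x]
      by_cases hx : x = c
      · subst hx
        rw [List.count_append]
        constructor <;> intro _ <;> omega
      · simp [List.count_append, Ne.symm hx]
  · by_cases ho : st.1.contains c = true
    · -- second occurrence: move c from once to multiple
      have hcm : c ∈ st.1 := by simpa [List.contains_eq_mem] using ho
      rw [h1] at hcm
      have hc1 : h.count c = 1 := by
        have := (List.mem_filter.mp hcm).2
        simpa using this
      have hc1' : c ∈ h := List.count_pos_iff.mp (by omega)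
      rw [if_neg hm, if_pos ho]
      constructor
      · show st.1.discard c = _
        rw [h1, PySem.Set.discard, List.filter_filter, pv_dedup_append, if_pos hc1']
        apply List.filter_congr
        intro x _
        by_cases hx : x = c
        · subst hx; simp [List.count_append]; omega
        · simp [List.count_append, Ne.symm hx, hx]
      · intro x
        rw [PySem.Set.mem_add, h2 x]
        by_cases hx : x = c
        · subst hx; simp [List.count_append, hc1]
        · simp [List.count_append, Ne.symm hx, hx]
    · -- first occurrence: c is fresh
      have hc0 : h.count c = 0 := by
        by_contra hne
        have hpos : c ∈ h := List.count_pos_iff.mp (by omega)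
        by_cases hc1 : h.count c = 1
        · have : c ∈ st.1 := by
            rw [h1]; exact List.mem_filter.mpr ⟨pv_mem_dedup.mpr hpos, by simp [hc1]⟩
          exact ho (by simpa [List.contains_eq_mem] using this)
        · have : c ∈ st.2 := (h2 c).mpr (by omega)
          exact hm (by simpa [List.contains_eq_mem] using this)
      have hcnm : c ∉ h := by
        intro hc; exact absurd hc0 (by have := List.count_pos_iff.mpr hc; omega)
      rw [if_neg hm, if_neg ho]
      constructor
      · show st.1.add c = _
        have : st.1.contains c = false := by simpa using ho
        rw [PySem.Set.add, this, if_neg (by simp), h1, pv_dedup_append, if_neg hcnm,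
          List.filter_append]
        congr 1
        · apply List.filter_congr
          intro x hx
          have hxc : x ≠ c := fun he => hcnm (pv_mem_dedup.mp (he ▸ hx))
          simp [List.count_append, Ne.symm hxc]
        · simp [List.count_append, hc0]
      · intro x
        rw [h2 x]
        by_cases hx : x = c
        · subst hx; simp [List.count_append, hc0]
        · simp [List.count_append, Ne.symm hx]

theorem pvFold_inv (l : List Char) (h : List Char) (st : PySem.Set Char × PySem.Set Char)
    (hinv : pvInv h st) : pvInv (h ++ l) (l.foldl pvStepB st) := by
  induction l generalizing h st with
  | nil => simpa using hinv
  | cons c t ih =>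
    simp only [List.foldl_cons]
    have := ih (h ++ [c]) (pvStepB st c) (pvStep_inv h c st hinv)
    simpa using this

theorem pv_filter_comm (l : List Char) (v : PySem.Set Char) :
    l.filter (fun i => !v.contains i && PySem.Chars.isalpha i) =
    l.filter (fun i => PySem.Chars.isalpha i && !v.contains i) := by
  apply List.filter_congr
  intro x _
  rw [Bool.and_comm]

theorem pvA_eq (cons : List Char) :
    (PySem.Dict.counter cons).keys.foldl
      (fun acc i => if (PySem.Dict.counter cons).getD i 0 == 1 then acc + 1 else acc) (0 : Int)
    = (((PySem.List.dedup cons).filter (fun c => cons.count c == 1)).length : Int) := by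
  rw [PySem.List.foldl_count_if, PySem.Dict.keys_counter, ← PySem.List.dedup_eq_ofList,
    zero_add, List.countP_eq_length_filter]
  congr 2
  apply List.filter_congr
  intro x _
  rw [PySem.Dict.getD_counter]
  by_cases hc : List.count x cons = 1
  · simp [hc]
  · simp [hc, Nat.cast_eq_one]

-- ===== VERDICT (by name: the statement is the Claim_ definition above) =====
theorem unique_consonants_spec : Claim_equal_unique_consonants := by
  intro s _
  unfold Spec_unique_consonants unique_consonants unique_consonants_alt
  simp only [PySem.List.foldl_append_if, List.nil_append, List.map_id']
  rw [pvA_eq, ← List.foldl_filter, ← pv_filter_comm]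
  have hinv := pvFold_inv
    ((PySem.Str.lower s).toList.filter
      (fun i => !(PySem.Set.ofList ['a','e','i','o','u'] : PySem.Set Char).contains i &&
        PySem.Chars.isalpha i))
    [] (PySem.Set.empty, PySem.Set.empty) ⟨rfl, by intro x; simp [PySem.Set.empty]⟩
  rw [List.nil_append] at hinv
  rw [PySem.Set.len, hinv.1]
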